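-- pv_equiv track=rewrite | github.com/alhasapi/experiments | op.py | conseqsOf
-- ===== SOURCE A (Python) =====
-- def conseqsOf(x, items):
--     for (idx, v) in enumerate(items):
--         if x == v:
--             s = []
--             f = idx
--             while f < len(items) and items[f] == x:
--                 s.append(x)
--                 f += 1
--             return (s, f)
--     return ([], 0)
-- ===== SOURCE B (Python) =====
-- def conseqsOf(x, items):
--     # scan maximal consecutive runs, keeping the current position, instead of
--     # elementwise first-match search followed by a count loop
--     n = len(items)
--     pos = 0
--     while pos < n:
--         v = items[pos]
--         start = pos
--         while pos < n and items[pos] == v: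
--             pos += 1
--         if v == x:
--             return ([x] * (pos - start), pos)
--     return ([], 0)
-- ===== Notes on version B (the rewrite author's own statement) =====
-- stated objective: alternative
-- what changed: B scans the list as maximal consecutive runs with a running offset and inspects each run's key, instead of A's elementwise search for the first match followed by a separate counting while-loop.
import Mathlib
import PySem

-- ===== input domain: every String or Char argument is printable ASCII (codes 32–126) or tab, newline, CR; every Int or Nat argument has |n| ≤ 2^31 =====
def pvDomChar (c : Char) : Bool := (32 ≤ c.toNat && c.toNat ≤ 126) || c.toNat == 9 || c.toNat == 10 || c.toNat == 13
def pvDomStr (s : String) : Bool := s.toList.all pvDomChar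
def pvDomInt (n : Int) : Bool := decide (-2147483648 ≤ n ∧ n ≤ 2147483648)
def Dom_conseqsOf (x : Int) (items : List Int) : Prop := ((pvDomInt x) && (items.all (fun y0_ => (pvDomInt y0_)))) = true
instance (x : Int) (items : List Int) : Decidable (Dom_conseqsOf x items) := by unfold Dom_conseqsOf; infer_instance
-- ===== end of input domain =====

-- B scans maximal consecutive runs with a running position instead of A's
-- elementwise first-match search followed by a counting while-loop (alternative, same cost).

-- ===== PORT A =====
-- inner while loop of A: while f < len(items) and items[f] == x: s.append(x); f += 1
def conseqsOfWhile (x : Int) (items : List Int) (s : List Int) (f : Nat) : List Int × Int :=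
  if h : f < items.length ∧ items.getD f 0 = x then
    conseqsOfWhile x items (s ++ [x]) (f + 1)
  else
    (s, (f : Int))
termination_by items.length - f
decreasing_by omega

-- outer for loop of A over enumerate(items): rest = items.drop idx
def conseqsOfLoop (x : Int) (items : List Int) : List Int → Nat → List Int × Int
  | [], _ => ([], 0)
  | v :: t, idx => if x = v then conseqsOfWhile x items [] idx else conseqsOfLoop x items t (idx + 1)

def conseqsOf (x : Int) (items : List Int) : List Int × Int :=
  conseqsOfLoop x items items 0

-- ===== PORT B =====
-- B's inner while loop: advance pos while items[pos] == v; returns the end position of the run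
def runEnd (items : List Int) (v : Int) (pos : Nat) : Nat :=
  if h : pos < items.length ∧ items.getD pos 0 = v then runEnd items v (pos + 1) else pos
termination_by items.length - pos
decreasing_by omega

-- bounds on runEnd, needed for the termination of B's outer loop
lemma runEnd_ge (items : List Int) (v : Int) :
    ∀ k pos, items.length - pos ≤ k → pos ≤ runEnd items v pos := by
  intro k
  induction k with
  | zero =>
    intro pos hk
    have hp : ¬ pos < items.length := by omega
    rw [runEnd, dif_neg (fun hc => hp hc.1)]
  | succ k ih =>
    intro pos hk
    by_cases hc : pos < items.length ∧ items.getD pos 0 = v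
    · rw [runEnd, dif_pos hc]
      have := ih (pos + 1) (by omega)
      omega
    · rw [runEnd, dif_neg hc]

lemma runEnd_le_length (items : List Int) (v : Int) :
    ∀ k pos, items.length - pos ≤ k → pos ≤ items.length → runEnd items v pos ≤ items.length := by
  intro k
  induction k with
  | zero =>
    intro pos hk hp
    have hnp : ¬ pos < items.length := by omega
    rw [runEnd, dif_neg (fun hc => hnp hc.1)]
    exact hp
  | succ k ih =>
    intro pos hk hp
    by_cases hc : pos < items.length ∧ items.getD pos 0 = v
    · rw [runEnd, dif_pos hc]
      exact ih (pos + 1) (by omega) (by omega)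
    · rw [runEnd, dif_neg hc]
      exact hp

lemma runEnd_gt (items : List Int) (v : Int) (pos : Nat)
    (h : pos < items.length ∧ items.getD pos 0 = v) : pos < runEnd items v pos := by
  rw [runEnd, dif_pos h]
  have := runEnd_ge items v (items.length - (pos + 1)) (pos + 1) (le_refl _)
  omega

-- B's outer loop over the current position
def conseqsOfRuns (x : Int) (items : List Int) (pos : Nat) : List Int × Int :=
  if hp : pos < items.length then
    let v := items.getD pos 0
    let e := runEnd items v pos
    if v = x then (List.replicate (e - pos) x, (e : Int))
    else conseqsOfRuns x items e
  else ([], 0)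
termination_by items.length - pos
decreasing_by
  have h1 := runEnd_gt items (items.getD pos 0) pos ⟨hp, rfl⟩
  have h2 := runEnd_le_length items (items.getD pos 0) (items.length - pos) pos (le_refl _) (by omega)
  omega

def conseqsOf_alt (x : Int) (items : List Int) : List Int × Int :=
  conseqsOfRuns x items 0

-- ===== PRECONDITION & SPEC =====
def Spec_conseqsOf (x : Int) (items : List Int) (out : List Int × Int) : Prop := out = conseqsOf_alt x items
instance (x : Int) (items : List Int) (out : List Int × Int) : Decidable (Spec_conseqsOf x items out) := by unfold Spec_conseqsOf; infer_instance

-- ===== CLAIM (what is proved, stated in full; the proofs are below) =====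
def Claim_equal_conseqsOf : Prop := ∀ (x : Int) (items : List Int), Dom_conseqsOf x items → Spec_conseqsOf x items (conseqsOf x items)

-- ===== LEMMAS AND PROOFS =====

-- length of the maximal prefix of a list equal to v (proof-side tool)
def runLen (v : Int) : List Int → Nat
  | [] => 0
  | a :: t => if a = v then runLen v t + 1 else 0

lemma runLen_cons (v a : Int) (t : List Int) :
    runLen v (a :: t) = if a = v then runLen v t + 1 else 0 := rfl

-- common reference: elementwise scan carrying the absolute index
def elemScan (x : Int) : List Int → Nat → List Int × Int
  | [], _ => ([], 0)
  | v :: t, idx =>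
    if x = v then (List.replicate (if v = x then runLen x t + 1 else 0) x, ((idx + (if v = x then runLen x t + 1 else 0) : Nat) : Int))
    else elemScan x t (idx + 1)

lemma drop_head_getD (items : List Int) (pos : Nat) (a : Int) (t : List Int)
    (hd : items.drop pos = a :: t) : items.getD pos 0 = a := by
  have h0 : (items.drop pos)[0]? = items[pos]? := by
    simp [List.getElem?_drop]
  rw [hd] at h0
  simp at h0
  simp [List.getD, h0.symm]

lemma drop_lt_length (items : List Int) (pos : Nat) (a : Int) (t : List Int)
    (hd : items.drop pos = a :: t) : pos < items.length := by
  by_contra h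
  have : items.drop pos = [] := List.drop_eq_nil_iff.mpr (by omega)
  simp [this] at hd

lemma drop_succ_of_drop (items : List Int) (pos : Nat) (a : Int) (t : List Int)
    (hd : items.drop pos = a :: t) : items.drop (pos + 1) = t := by
  have : items.drop (pos + 1) = (items.drop pos).drop 1 := by rw [List.drop_drop]
  rw [this, hd]; simp

lemma conseqsOfWhile_eq (x : Int) (items : List Int) :
    ∀ suf s f, items.drop f = suf →
      conseqsOfWhile x items s f
        = (s ++ List.replicate (runLen x suf) x, ((f + runLen x suf : Nat) : Int)) := by
  intro suf
  induction suf with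
  | nil =>
    intro s f hd
    have hf : items.length ≤ f := by
      by_contra h
      have := List.drop_eq_nil_iff.mp hd
      omega
    rw [conseqsOfWhile, dif_neg (fun hc => by omega)]
    simp [runLen]
  | cons a t ih =>
    intro s f hd
    have hf : f < items.length := drop_lt_length items f a t hd
    have hget : items.getD f 0 = a := drop_head_getD items f a t hd
    have hdrop : items.drop (f + 1) = t := drop_succ_of_drop items f a t hd
    by_cases hax : a = x
    · rw [conseqsOfWhile, dif_pos ⟨hf, by rw [hget, hax]⟩]
      rw [ih (s ++ [x]) (f + 1) hdrop]
      subst hax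
      simp [runLen_cons, List.replicate_succ]
      omega
    · rw [conseqsOfWhile, dif_neg (fun hc => hax (by rw [hget] at hc; exact hc.2))]
      simp [runLen_cons, hax]

lemma conseqsOfLoop_eq (x : Int) (items : List Int) :
    ∀ rest idx, items.drop idx = rest →
      conseqsOfLoop x items rest idx = elemScan x rest idx := by
  intro rest
  induction rest with
  | nil => intro idx _; rfl
  | cons v t ih =>
    intro idx hd
    have hdrop : items.drop (idx + 1) = t := drop_succ_of_drop items idx v t hd
    by_cases hxv : x = v
    · simp only [conseqsOfLoop, elemScan, if_pos hxv]
      rw [conseqsOfWhile_eq x items (v :: t) [] idx hd]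
      subst hxv
      simp [runLen_cons]
    · simp only [conseqsOfLoop, elemScan, if_neg hxv]
      exact ih (idx + 1) hdrop

-- skipping a run of v ≠ x does not change the elementwise scan (with shifted index)
lemma elemScan_drop_run (x v : Int) (hvx : v ≠ x) :
    ∀ t idx, elemScan x t idx = elemScan x (t.drop (runLen v t)) (idx + runLen v t) := by
  intro t
  induction t with
  | nil => intro idx; simp [runLen]
  | cons a t' ih =>
    intro idx
    by_cases hav : a = v
    · have hxa : ¬ x = a := by rw [hav]; exact fun h => hvx h.symm
      rw [runLen_cons]
      simp only [if_pos hav]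
      have hstep : elemScan x (a :: t') idx = elemScan x t' (idx + 1) := by
        simp [elemScan, hxa]
      rw [hstep, ih (idx + 1)]
      simp only [List.drop_succ_cons]
      congr 1
      omega
    · simp [runLen_cons, hav]

lemma runEnd_eq_runLen (items : List Int) (v : Int) :
    ∀ suf pos, items.drop pos = suf → runEnd items v pos = pos + runLen v suf := by
  intro suf
  induction suf with
  | nil =>
    intro pos hd
    have hp : items.length ≤ pos := by
      by_contra h
      have := List.drop_eq_nil_iff.mp hd
      omega
    rw [runEnd, dif_neg (fun hc => by omega)]
    simp [runLen]
  | cons a t ih =>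
    intro pos hd
    have hp : pos < items.length := drop_lt_length items pos a t hd
    have hget : items.getD pos 0 = a := drop_head_getD items pos a t hd
    have hdrop : items.drop (pos + 1) = t := drop_succ_of_drop items pos a t hd
    by_cases hav : a = v
    · rw [runEnd, dif_pos ⟨hp, by rw [hget, hav]⟩]
      rw [ih (pos + 1) hdrop, runLen_cons, if_pos hav]
      omega
    · rw [runEnd, dif_neg (fun hc => hav (by rw [hget] at hc; exact hc.2))]
      simp [runLen_cons, hav]

lemma conseqsOfRuns_eq (x : Int) (items : List Int) :
    ∀ k pos, items.length - pos ≤ k →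
      conseqsOfRuns x items pos = elemScan x (items.drop pos) pos := by
  intro k
  induction k with
  | zero =>
    intro pos hk
    have hp : ¬ pos < items.length := by omega
    have hd : items.drop pos = [] := List.drop_eq_nil_iff.mpr (by omega)
    rw [conseqsOfRuns, dif_neg hp, hd]
    rfl
  | succ k ih =>
    intro pos hk
    by_cases hp : pos < items.length
    · obtain ⟨v, t, hd⟩ : ∃ v t, items.drop pos = v :: t := by
        cases hcd : items.drop pos with
        | nil =>
          have := List.drop_eq_nil_iff.mp hcd
          omega
        | cons v t => exact ⟨v, t, rfl⟩
      have hget : items.getD pos 0 = v := drop_head_getD items pos v t hd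
      have hdrop1 : items.drop (pos + 1) = t := drop_succ_of_drop items pos v t hd
      have hre : runEnd items v pos = pos + (runLen v t + 1) := by
        rw [runEnd_eq_runLen items v (v :: t) pos hd, runLen_cons, if_pos rfl]
      rw [conseqsOfRuns, dif_pos hp]
      simp only [hget, hre, hd]
      by_cases hvx : v = x
      · have hxv : x = v := hvx.symm
        simp only [if_pos hvx, elemScan, if_pos hxv]
        subst hvx
        have : pos + (runLen v t + 1) - pos = runLen v t + 1 := by omega
        rw [this]
      · have hxv : ¬ x = v := fun h => hvx h.symm
        simp only [if_neg hvx]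
        have hdrop2 : items.drop (pos + (runLen v t + 1)) = t.drop (runLen v t) := by
          have : pos + (runLen v t + 1) = (pos + 1) + runLen v t := by omega
          rw [this, ← List.drop_drop, hdrop1]
        rw [ih (pos + (runLen v t + 1)) (by omega), hdrop2]
        have hstep : elemScan x (v :: t) pos = elemScan x t (pos + 1) := by
          simp [elemScan, hxv]
        rw [hstep, elemScan_drop_run x v hvx t (pos + 1)]
        congr 1
        omega
    · have hd : items.drop pos = [] := List.drop_eq_nil_iff.mpr (by omega)
      rw [conseqsOfRuns, dif_neg hp, hd]
      rfl

-- ===== VERDICT (by name: the statement is the Claim_ definition above) =====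
theorem conseqsOf_spec : Claim_equal_conseqsOf := by
  intro x items _
  unfold Spec_conseqsOf conseqsOf conseqsOf_alt
  rw [conseqsOfLoop_eq x items items 0 (by simp),
      conseqsOfRuns_eq x items items.length 0 (by omega)]
  simp
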